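-- pv_equiv track=rewrite | github.com/dimakor/AoC | aoc23/aoc23.py | process
-- ===== SOURCE A (Python) =====
-- def process(puzzle_input):
--     """Parse input"""
--     connections = dict()
--     hist = set()
--     vertices = set()
--     for line in puzzle_input.split("\n"):
--         c1 = line[0:2]
--         c2 = line[3:5]
--         vertices.add(c1)
--         vertices.add(c2)
--         try:
--             connections[c1].add(c2)
--         except KeyError:
--             connections[c1] = {c2}
--         try:
--             connections[c2].add(c1)
--         except KeyError:
--             connections[c2] = {c1}
--         if c1[0] == "t":
--             hist.add(c1)
--         if c2[0] == "t":
--             hist.add(c2)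
--
--     return connections, hist, vertices
-- ===== SOURCE B (Python) =====
-- def process(puzzle_input):
--     """Parse input"""
--     arcs = []
--     for line in puzzle_input.split("\n"):
--         arcs.append((line[0:2], line[3:5]))
--         arcs.append((line[3:5], line[0:2]))
--     srcs = [a for a, _ in arcs]
--     vertices = set(srcs)
--     connections = {v: {b for a, b in arcs if a == v} for v in srcs}
--     hist = {v for v in vertices if v[0] == "t"}
--     return connections, hist, vertices
-- ===== Notes on version B (the rewrite author's own statement) =====
-- stated objective: alternative
-- what changed: B first flattens the input into a directed arc list, then derives the vertex set from the arc sources, builds the adjacency dict by a per-vertex gather comprehension over the arc list, and filters the vertices for hist, instead of accumulating all three structures incrementally per line.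
import Mathlib
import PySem

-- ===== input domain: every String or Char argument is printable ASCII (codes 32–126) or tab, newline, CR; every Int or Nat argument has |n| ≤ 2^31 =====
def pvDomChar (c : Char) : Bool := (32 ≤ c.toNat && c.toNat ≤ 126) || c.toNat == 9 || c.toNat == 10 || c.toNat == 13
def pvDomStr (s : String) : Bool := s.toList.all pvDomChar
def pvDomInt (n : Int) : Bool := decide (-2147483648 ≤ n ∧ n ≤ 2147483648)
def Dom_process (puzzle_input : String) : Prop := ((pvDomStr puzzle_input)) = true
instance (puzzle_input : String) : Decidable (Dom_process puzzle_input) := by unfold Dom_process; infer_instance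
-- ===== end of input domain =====

-- B replaces the one incremental pass by staged passes: flatten to a directed arc list,
-- derive vertices from arc sources, gather each vertex's neighbour set from the arc list
-- (different decomposition, not faster); return-value equivalence only.

-- ===== PORT A =====
-- helper used by both ports: Python's  v[0] == "t"
def tpred (v : String) : Bool := PySem.Str.pyGet? v 0 == some 't'

-- one line of A's loop: update (connections, hist, vertices)
def processStep (st : PySem.Dict String (PySem.Set String) × PySem.Set String × PySem.Set String)
    (line : String) : PySem.Dict String (PySem.Set String) × PySem.Set String × PySem.Set String :=
  let c1 := PySem.Str.slice line (some 0) (some 2)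
  let c2 := PySem.Str.slice line (some 3) (some 5)
  let vertices := PySem.Set.add (PySem.Set.add st.2.2 c1) c2
  -- try connections[c1].add(c2) except KeyError: connections[c1] = {c2}  ≡  d[c1] = d.get(c1, ∅) ∪ {c2}
  let conn := (st.1.modify c1 PySem.Set.empty (fun s => PySem.Set.add s c2)).modify c2
      PySem.Set.empty (fun s => PySem.Set.add s c1)
  let hist := if tpred c1 then PySem.Set.add st.2.1 c1 else st.2.1
  let hist := if tpred c2 then PySem.Set.add hist c2 else hist
  (conn, hist, vertices)

def process (puzzle_input : String) : (List (String × List String)) × List String × List String :=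
  let r := ((PySem.Str.split? puzzle_input "\n").getD []).foldl processStep
      (PySem.Dict.empty, PySem.Set.empty, PySem.Set.empty)
  (r.1.items, r.2.1, r.2.2)

-- ===== PORT B =====
-- the two directed arcs of one line (appended by B's first loop)
def arcF (line : String) : List (String × String) :=
  [(PySem.Str.slice line (some 0) (some 2), PySem.Str.slice line (some 3) (some 5)),
   (PySem.Str.slice line (some 3) (some 5), PySem.Str.slice line (some 0) (some 2))]

-- B's first loop body: arcs.append((c1, c2)); arcs.append((c2, c1))
def arcStepB (acc : List (String × String)) (line : String) : List (String × String) :=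
  acc ++ arcF line

-- B's set comprehension {b for a, b in arcs if a == v}
def gatherB (arcs : List (String × String)) (v : String) : PySem.Set String :=
  PySem.Set.ofList (arcs.filterMap (fun p => if p.1 == v then some p.2 else none))

def process_alt (puzzle_input : String) : (List (String × List String)) × List String × List String :=
  let arcs := ((PySem.Str.split? puzzle_input "\n").getD []).foldl arcStepB []
  let srcs := arcs.map Prod.fst
  let vertices := PySem.Set.ofList srcs
  let conn := srcs.foldl (fun d v => d.insert v (gatherB arcs v)) PySem.Dict.empty
  let hist := vertices.filter tpred
  (conn.items, hist, vertices)

-- ===== PRECONDITION & SPEC =====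
-- Pre_ excludes inputs containing a line shorter than 4 characters: there line[3:5] (or line[0:2])
-- is empty and both A and B raise IndexError on its first character.
def Pre_process (puzzle_input : String) : Prop :=
  ∀ line ∈ (PySem.Str.split? puzzle_input "\n").getD [], 4 ≤ PySem.Str.len line
instance (puzzle_input : String) : Decidable (Pre_process puzzle_input) := by
  unfold Pre_process; infer_instance
def pvWitness_process : String := "ab-cd\ntx-ab"

def Spec_process (puzzle_input : String) (out : (List (String × List String)) × List String × List String) : Prop := out = process_alt puzzle_input
instance (puzzle_input : String) (out : (List (String × List String)) × List String × List String) : Decidable (Spec_process puzzle_input out) := by unfold Spec_process; infer_instance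

-- ===== CLAIM (what is proved, stated in full; the proofs are below) =====
def Claim_equal_process : Prop := ∀ (puzzle_input : String), Dom_process puzzle_input → Pre_process puzzle_input → Spec_process puzzle_input (process puzzle_input)

-- ===== LEMMAS AND PROOFS =====

-- A's per-arc dict update
def arcUpd (d : PySem.Dict String (PySem.Set String)) (p : String × String) :
    PySem.Dict String (PySem.Set String) :=
  d.modify p.1 PySem.Set.empty (fun s => PySem.Set.add s p.2)

theorem filter_add (v : PySem.Set String) (h : PySem.Set String) (c : String)
    (hh : h = v.filter tpred) :
    (if tpred c then PySem.Set.add h c else h) = (PySem.Set.add v c).filter tpred := by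
  by_cases hm : c ∈ v
  · rw [PySem.Set.add_of_mem hm, ← hh]
    split_ifs with hp
    · exact PySem.Set.add_of_mem (by rw [hh]; exact List.mem_filter.mpr ⟨hm, hp⟩)
    · rfl
  · rw [PySem.Set.add_of_not_mem hm, List.filter_append, ← hh]
    split_ifs with hp
    · rw [PySem.Set.add_of_not_mem (fun hc => hm (List.mem_of_mem_filter (hh ▸ hc)))]
      simp [hp]
    · simp [hp]

-- A's loop, re-expressed over the flattened arc list
theorem loopA (lines : List String) (d : PySem.Dict String (PySem.Set String))
    (h v : PySem.Set String) (hh : h = v.filter tpred) :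
    lines.foldl processStep (d, h, v) =
      ((lines.flatMap arcF).foldl arcUpd d,
       (PySem.Set.update v ((lines.flatMap arcF).map Prod.fst)).filter tpred,
       PySem.Set.update v ((lines.flatMap arcF).map Prod.fst)) := by
  induction lines generalizing d h v with
  | nil => simp [PySem.Set.update, hh]
  | cons line rest ih =>
    simp only [List.foldl_cons, List.flatMap_cons, List.map_append, List.foldl_append]
    have hstep : processStep (d, h, v) line =
        (((arcF line).foldl arcUpd d),
         (if tpred (PySem.Str.slice line (some 3) (some 5)) then
            PySem.Set.add (if tpred (PySem.Str.slice line (some 0) (some 2)) then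
              PySem.Set.add h (PySem.Str.slice line (some 0) (some 2)) else h)
              (PySem.Str.slice line (some 3) (some 5))
          else (if tpred (PySem.Str.slice line (some 0) (some 2)) then
            PySem.Set.add h (PySem.Str.slice line (some 0) (some 2)) else h)),
         PySem.Set.add (PySem.Set.add v (PySem.Str.slice line (some 0) (some 2)))
           (PySem.Str.slice line (some 3) (some 5))) := rfl
    rw [hstep, ih _ _ _ (filter_add _ _ _ (filter_add _ _ _ hh))]
    simp [PySem.Set.update, arcF]

-- getD through A's grouping fold
theorem getD_foldl_arcUpd (arcs : List (String × String)) (d : PySem.Dict String (PySem.Set String))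
    (k : String) :
    (arcs.foldl arcUpd d).getD k PySem.Set.empty =
      (arcs.filterMap (fun p => if p.1 == k then some p.2 else none)).foldl PySem.Set.add
        (d.getD k PySem.Set.empty) := by
  induction arcs generalizing d with
  | nil => simp
  | cons p rest ih =>
    simp only [List.foldl_cons, List.filterMap_cons, ih]
    by_cases hpk : p.1 = k
    · subst hpk
      simp [arcUpd]
    · simp [arcUpd, PySem.Dict.getD_modify, hpk, Ne.symm hpk]

-- getD through B's insert fold (the stored value depends only on the key)
theorem getD_foldl_insert_fun (srcs : List String) (g : String → PySem.Set String)
    (d : PySem.Dict String (PySem.Set String)) (k : String) :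
    (srcs.foldl (fun d v => d.insert v (g v)) d).getD k PySem.Set.empty =
      if k ∈ srcs then g k else d.getD k PySem.Set.empty := by
  induction srcs generalizing d with
  | nil => simp
  | cons x rest ih =>
    simp only [List.foldl_cons, ih, PySem.Dict.getD_insert, List.mem_cons]
    by_cases h1 : k ∈ rest <;> by_cases h2 : k = x <;> simp [h1, h2]

-- keys of A's grouping fold, as a set of the arc sources
theorem keys_foldl_arcUpd (arcs : List (String × String)) (d : PySem.Dict String (PySem.Set String)) :
    (arcs.foldl arcUpd d).keys = PySem.Set.update d.keys (arcs.map Prod.fst) := by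
  exact PySem.Dict.keys_foldl_modify_key arcs Prod.fst PySem.Set.empty
    (fun _ p s => PySem.Set.add s p.2) d

-- ===== VERDICT (by name: the statement is the Claim_ definition above) =====
theorem process_spec : Claim_equal_process := by
  intro p _ _
  show process p = process_alt p
  simp only [process, process_alt]
  have harcs : ((PySem.Str.split? p "\n").getD []).foldl arcStepB [] =
      ((PySem.Str.split? p "\n").getD []).flatMap arcF := by
    rw [show arcStepB = fun acc line => acc ++ arcF line from rfl,
      PySem.List.foldl_append_eq_flatMap]
    simp
  rw [harcs, loopA ((PySem.Str.split? p "\n").getD []) PySem.Dict.empty PySem.Set.empty PySem.Set.empty rfl]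
  have hofl : PySem.Set.update PySem.Set.empty
      ((((PySem.Str.split? p "\n").getD []).flatMap arcF).map Prod.fst) =
      PySem.Set.ofList ((((PySem.Str.split? p "\n").getD []).flatMap arcF).map Prod.fst) := rfl
  rw [hofl]
  refine Prod.ext ?_ rfl
  -- items of the two dicts
  show ((((PySem.Str.split? p "\n").getD []).flatMap arcF).foldl arcUpd PySem.Dict.empty).items = _
  set arcs := (((PySem.Str.split? p "\n").getD []).flatMap arcF) with harcsdef
  set srcs := arcs.map Prod.fst with hsrc
  have hkM : (arcs.foldl arcUpd PySem.Dict.empty).keys = PySem.Set.ofList srcs := by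
    rw [keys_foldl_arcUpd]; rfl
  have hkN : (srcs.foldl (fun d v => d.insert v (gatherB arcs v)) PySem.Dict.empty).keys =
      PySem.Set.ofList srcs := by
    rw [PySem.Dict.keys_foldl_insert]; rfl
  rw [PySem.Dict.items_eq_map_keys _ (by rw [hkM]; exact PySem.Set.nodup_ofList srcs) PySem.Set.empty,
    PySem.Dict.items_eq_map_keys _ (by rw [hkN]; exact PySem.Set.nodup_ofList srcs) PySem.Set.empty,
    hkM, hkN]
  refine List.map_congr_left (fun k hk => ?_)
  have hks : k ∈ srcs := (PySem.Set.mem_ofList srcs k).mp hk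
  rw [getD_foldl_arcUpd, getD_foldl_insert_fun, if_pos hks]
  simp [gatherB, PySem.Set.ofList_eq_foldl, PySem.Dict.getD_empty]
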